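/-
  Tokens as bytes: how `jsmntok_t` lies in memory (little-endian `int`s: type, start, end, size — 16 bytes — and `parent` with
  JSMN_PARENT_LINKS — 20 bytes), and the output format of `jsmn_main` (proofs/c6/shim.c): the result as a little-endian `int`, then, if it
  is not negative, that many tokens.
-/
import Json.Jsmn.Model

namespace Jsmn

/-- The four bytes of an `int` / `unsigned int`, little-endian. -/
def le32 (x : Int) : List UInt8 :=
  let n := u32 x
  [UInt8.ofNat n, UInt8.ofNat (n / 256), UInt8.ofNat (n / 65536), UInt8.ofNat (n / 16777216)]

/-- `sizeof(jsmntok_t)`. -/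
def Config.tokSize (cfg : Config) : Nat := if cfg.parentLinks then 20 else 16

/-- One `jsmntok_t` in memory. -/
def Token.bytes (cfg : Config) (t : Token) : List UInt8 :=
  le32 t.type ++ le32 t.start ++ le32 t.«end» ++ le32 t.size ++ (if cfg.parentLinks then le32 t.parent else [])

/-- What `jsmn_main` leaves in the output buffer when jsmn_parse returned `r` with these tokens. -/
def encodeResult (cfg : Config) (r : Int) (ts : Tokens) : List UInt8 :=
  le32 r ++ if r < 0 then [] else (ts.take r.toNat).flatMap (Token.bytes cfg)

/-- The output for a successful parse: the number of tokens, then the tokens. -/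
def encode (cfg : Config) (ts : Tokens) : List UInt8 := encodeResult cfg ts.length ts

/-- Four little-endian bytes as an `int`. -/
def rd32 (b0 b1 b2 b3 : UInt8) : Int := i32 (b0.toNat + 256 * b1.toNat + 65536 * b2.toNat + 16777216 * b3.toNat)

/-- Reading a token array back from memory (for the test driver). -/
def decodeTokens (cfg : Config) : List UInt8 → Tokens
  | b0 :: b1 :: b2 :: b3 :: c0 :: c1 :: c2 :: c3 :: d0 :: d1 :: d2 :: d3 :: e0 :: e1 :: e2 :: e3 :: rest =>
    if cfg.parentLinks then
      match rest with
      | f0 :: f1 :: f2 :: f3 :: rest' =>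
        ⟨u32 (rd32 b0 b1 b2 b3), rd32 c0 c1 c2 c3, rd32 d0 d1 d2 d3, rd32 e0 e1 e2 e3, rd32 f0 f1 f2 f3⟩ :: decodeTokens cfg rest'
      | _ => []
    else ⟨u32 (rd32 b0 b1 b2 b3), rd32 c0 c1 c2 c3, rd32 d0 d1 d2 d3, rd32 e0 e1 e2 e3, 0⟩ :: decodeTokens cfg rest
  | _ => []
termination_by bs => bs.length
decreasing_by all_goals simp_wf <;> omega

end Jsmn
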